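-- pv_equiv track=rewrite | github.com/GauravBindra/Asteroid-browser-agent | nova-act2/element_position_finder.py | get_field_label
-- ===== SOURCE A (Python) =====
-- def get_field_label(field_name):
--     """Convert a camelCase field name to a display label."""
--     # Common field mappings
--     mappings = {
--         "firstName": "First Name",
--         "lastName": "Last Name",
--         "dateOfBirth": "Date of Birth",
--         "phoneNumber": "Phone Number",
--         "jointInsured": "Joint Insured",
--         "jointInsuredPersonName": "Joint Insured Person Name",
--         "numberOfYearsAsLandlord": "Number of Years as Landlord",
--         "title": "Title"
--     }
--
--     # Return from mappings if available
--     if field_name in mappings: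
--         return mappings[field_name]
--
--     # Otherwise do a generic conversion
--     words = []
--     current = ""
--     for i, char in enumerate(field_name):
--         if i > 0 and char.isupper():
--             words.append(current)
--             current = char
--         else:
--             current += char
--     words.append(current)
--
--     return " ".join(word.capitalize() for word in words)
-- ===== SOURCE B (Python) =====
-- def get_field_label(field_name):
--     """Convert a camelCase field name to a display label."""
--     mappings = {
--         "firstName": "First Name",
--         "lastName": "Last Name",
--         "dateOfBirth": "Date of Birth",
--         "phoneNumber": "Phone Number",
--         "jointInsured": "Joint Insured",
--         "jointInsuredPersonName": "Joint Insured Person Name",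
--         "numberOfYearsAsLandlord": "Number of Years as Landlord",
--         "title": "Title"
--     }
--     if field_name in mappings:
--         return mappings[field_name]
--     # Single flat pass: no word list, no capitalize. Every word after the first
--     # starts at an uppercase char (left unchanged) and its remaining chars are
--     # never uppercase (so capitalize's lowercasing is a no-op on ASCII); only the
--     # very first char may need uppercasing.
--     if not field_name:
--         return ""
--     out = [field_name[0].upper()]
--     for ch in field_name[1:]:
--         if ch.isupper():
--             out.append(" ")
--         out.append(ch)
--     return "".join(out)
-- ===== Notes on version B (the rewrite author's own statement) =====
-- stated objective: simpler
-- what changed: B drops A's build-word-list/capitalize/join pipeline: since every word after the first starts at its uppercase char and word interiors are never uppercase, B makes one flat pass that uppercases the first character and inserts a space before each uppercase character.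
import Mathlib
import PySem

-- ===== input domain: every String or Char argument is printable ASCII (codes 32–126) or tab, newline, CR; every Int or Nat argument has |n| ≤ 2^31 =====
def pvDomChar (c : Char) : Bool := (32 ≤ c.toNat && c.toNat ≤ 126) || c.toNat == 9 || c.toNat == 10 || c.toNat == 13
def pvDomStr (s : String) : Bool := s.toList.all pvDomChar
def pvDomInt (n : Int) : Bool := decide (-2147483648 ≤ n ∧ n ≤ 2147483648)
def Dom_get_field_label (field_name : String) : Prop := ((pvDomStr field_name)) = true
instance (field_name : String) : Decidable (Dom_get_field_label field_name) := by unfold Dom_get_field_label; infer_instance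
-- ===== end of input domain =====

-- B replaces A's accumulate-words-then-capitalize-and-join loop by a single flat
-- pass that uppercases the first char and inserts a space before each uppercase
-- char; objective: simpler.

-- ===== PORT A =====
def pvMappings : PySem.Dict String String := PySem.Dict.mk
  [("firstName", "First Name"),
   ("lastName", "Last Name"),
   ("dateOfBirth", "Date of Birth"),
   ("phoneNumber", "Phone Number"),
   ("jointInsured", "Joint Insured"),
   ("jointInsuredPersonName", "Joint Insured Person Name"),
   ("numberOfYearsAsLandlord", "Number of Years as Landlord"),
   ("title", "Title")]

-- word.capitalize() : exact on the ASCII domain (first char uppercased, rest lowercased)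
def pvCap (w : List Char) : List Char :=
  match w with
  | [] => []
  | c :: cs => PySem.Chars.upperChar c :: cs.map PySem.Chars.lowerChar

-- one iteration of A's `for i, char in enumerate(field_name)` loop
def pvStepA (st : List (List Char) × List Char) (p : Int × Char) :
    List (List Char) × List Char :=
  if 0 < p.1 ∧ PySem.Chars.isupper p.2 then (st.1 ++ [st.2], [p.2])
  else (st.1, st.2 ++ [p.2])

def get_field_label (field_name : String) : String :=
  match pvMappings.get? field_name with
  | some v => v
  | none =>
    let st := (PySem.List.enumerate field_name.toList 0).foldl pvStepA ([], [])
    let words := st.1 ++ [st.2]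
    String.mk (PySem.Chars.join [' '] (words.map pvCap))

-- ===== PORT B =====
-- per-char emission of B's loop body: space before an uppercase char
def pvFlat (c : Char) : List Char :=
  if PySem.Chars.isupper c then [' ', c] else [c]

def get_field_label_alt (field_name : String) : String :=
  match pvMappings.get? field_name with
  | some v => v
  | none =>
    match field_name.toList with
    | [] => ""
    | c :: rest => String.mk (PySem.Chars.upperChar c :: rest.flatMap pvFlat)

-- ===== PRECONDITION & SPEC =====
def Spec_get_field_label (field_name : String) (out : String) : Prop := out = get_field_label_alt field_name
instance (field_name : String) (out : String) : Decidable (Spec_get_field_label field_name out) := by unfold Spec_get_field_label; infer_instance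

-- ===== CLAIM (what is proved, stated in full; the proofs are below) =====
def Claim_equal_get_field_label : Prop := ∀ (field_name : String), Dom_get_field_label field_name → Spec_get_field_label field_name (get_field_label field_name)

-- ===== LEMMAS AND PROOFS =====

-- A's word splitter, structurally: (earlier words, current word)
def pvG2 (acc : List Char) : List Char → List (List Char) × List Char
  | [] => ([], acc)
  | c :: cs =>
    if PySem.Chars.isupper c then (acc :: (pvG2 [c] cs).1, (pvG2 [c] cs).2)
    else pvG2 (acc ++ [c]) cs

theorem pvLower_id (c : Char) (h : PySem.Chars.isupper c = false) :
    PySem.Chars.lowerChar c = c := by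
  simp [PySem.Chars.lowerChar, h]

theorem pvUpper_id (c : Char) (h : PySem.Chars.isupper c = true) :
    PySem.Chars.upperChar c = c := by
  have hl : PySem.Chars.islower c = false := by
    rcases Bool.eq_false_or_eq_true (PySem.Chars.islower c) with h0 | h0
    · exfalso
      simp only [PySem.Chars.islower, Bool.and_eq_true, decide_eq_true_eq] at h0
      simp only [PySem.Chars.isupper, Bool.and_eq_true, decide_eq_true_eq] at h
      exact absurd (le_trans h0.1 h.2) (by decide)
    · exact h0
  simp [PySem.Chars.upperChar, hl]

theorem pvCap_snoc (a : Char) (as : List Char) (c : Char)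
    (hc : PySem.Chars.isupper c = false) :
    pvCap (a :: (as ++ [c])) = pvCap (a :: as) ++ [c] := by
  simp [pvCap, pvLower_id c hc]

theorem pvFold_eq_g2 (rest : List Char) : ∀ (k : Int), 1 ≤ k →
    ∀ (ws : List (List Char)) (acc : List Char),
    (PySem.List.enumerate rest k).foldl pvStepA (ws, acc)
      = (ws ++ (pvG2 acc rest).1, (pvG2 acc rest).2) := by
  induction rest with
  | nil => intro k hk ws acc; simp [PySem.List.enumerate_nil, pvG2]
  | cons c cs ih =>
    intro k hk ws acc
    rw [PySem.List.enumerate_cons]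
    by_cases hc : PySem.Chars.isupper c = true
    · simp only [List.foldl_cons, pvStepA, hc, and_true,
        show (0 : Int) < k from by omega, if_pos trivial, pvG2]
      rw [ih (k + 1) (by omega)]
      simp
    · simp only [List.foldl_cons, pvStepA, hc, pvG2, Bool.false_eq_true,
        and_false, if_false]
      rw [ih (k + 1) (by omega)]

theorem pvJoin_g2 (rest : List Char) : ∀ (a : Char) (as : List Char),
    PySem.Chars.join [' ']
        (((pvG2 (a :: as) rest).1 ++ [(pvG2 (a :: as) rest).2]).map pvCap)
      = pvCap (a :: as) ++ rest.flatMap pvFlat := by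
  induction rest with
  | nil => intro a as; simp [pvG2, PySem.Chars.join_singleton]
  | cons c cs ih =>
    intro a as
    by_cases hc : PySem.Chars.isupper c = true
    · have hrec := ih c []
      have hcap : pvCap [c] = [c] := by simp [pvCap, pvUpper_id c hc]
      obtain ⟨q, qs, hq⟩ := List.exists_cons_of_ne_nil
        (show ((pvG2 [c] cs).1 ++ [(pvG2 [c] cs).2]).map pvCap ≠ [] by simp)
      simp only [pvG2, hc, if_true]
      rw [show (((a :: as) :: (pvG2 [c] cs).1) ++ [(pvG2 [c] cs).2]).map pvCap
            = pvCap (a :: as)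
                :: ((pvG2 [c] cs).1 ++ [(pvG2 [c] cs).2]).map pvCap by simp,
        hq, PySem.Chars.join_cons_cons, ← hq, hrec, hcap]
      simp [pvFlat, hc]
    · simp only [pvG2, hc, Bool.false_eq_true, if_false]
      rw [List.cons_append, ih a (as ++ [c]), pvCap_snoc a as c (by simp [hc])]
      simp [pvFlat, hc]

-- ===== VERDICT (by name: the statement is the Claim_ definition above) =====
theorem get_field_label_spec : Claim_equal_get_field_label := by
  unfold Claim_equal_get_field_label Spec_get_field_label
  intro s _
  unfold get_field_label get_field_label_alt
  cases hm : pvMappings.get? s with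
  | some v => simp
  | none =>
    simp only
    cases hs : s.toList with
    | nil =>
      simp [PySem.List.enumerate_nil, pvCap, PySem.Chars.join_singleton]
      rfl
    | cons c rest =>
      rw [PySem.List.enumerate_cons, List.foldl_cons,
        show pvStepA ([], []) (0, c) = ([], [c]) by
          simp [pvStepA]]
      simp only [zero_add]
      rw [pvFold_eq_g2 rest 1 (by omega) [] [c]]
      simp only [List.nil_append]
      rw [pvJoin_g2 rest c []]
      simp [pvCap]
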